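-- pv_equiv track=rewrite | github.com/Harmony-Stella/Algorithme-Python | sac_a_dos_4a.py | sac_a_dos2
-- ===== SOURCE A (Python) =====
-- def sac_a_dos2(masse_max, liste_objets):
--     # trier les objets selon leur poids croissant
--     sorted_objets = sorted(liste_objets, key=lambda x: x[1])
--     masse_totale = 0
--     valeur_totale = 0
--     sac = []
--     for objet in sorted_objets:
--         if masse_totale + objet[1] <= masse_max:
--             sac.append(objet)
--             masse_totale += objet[1]
--             valeur_totale += objet[0]
--         else:
--             break
--     return sac, valeur_totale, masse_totale
-- ===== SOURCE B (Python) =====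
-- def sac_a_dos2(masse_max, liste_objets):
--     sorted_objets = sorted(liste_objets, key=lambda x: x[1])
--     # cumulative weights
--     cum = []
--     total = 0
--     for _, p in sorted_objets:
--         total += p
--         cum.append(total)
--     # first position whose cumulative mass exceeds masse_max (linear scan: weights may be negative)
--     cutoff = len(cum)
--     for i, c in enumerate(cum):
--         if c > masse_max:
--             cutoff = i
--             break
--     sac = sorted_objets[:cutoff]
--     valeur_totale = sum(v for v, _ in sac)
--     masse_totale = sum(p for _, p in sac)
--     return sac, valeur_totale, masse_totale
-- ===== Notes on version B (the rewrite author's own statement) =====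
-- stated objective: alternative
-- what changed: Replaces A's single break-on-overflow accumulation loop by a different decomposition: build a cumulative-weight list, linearly scan it for the first position exceeding masse_max, slice the sorted prefix there, and compute value and mass as two separate sums over that slice.
import Mathlib
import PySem

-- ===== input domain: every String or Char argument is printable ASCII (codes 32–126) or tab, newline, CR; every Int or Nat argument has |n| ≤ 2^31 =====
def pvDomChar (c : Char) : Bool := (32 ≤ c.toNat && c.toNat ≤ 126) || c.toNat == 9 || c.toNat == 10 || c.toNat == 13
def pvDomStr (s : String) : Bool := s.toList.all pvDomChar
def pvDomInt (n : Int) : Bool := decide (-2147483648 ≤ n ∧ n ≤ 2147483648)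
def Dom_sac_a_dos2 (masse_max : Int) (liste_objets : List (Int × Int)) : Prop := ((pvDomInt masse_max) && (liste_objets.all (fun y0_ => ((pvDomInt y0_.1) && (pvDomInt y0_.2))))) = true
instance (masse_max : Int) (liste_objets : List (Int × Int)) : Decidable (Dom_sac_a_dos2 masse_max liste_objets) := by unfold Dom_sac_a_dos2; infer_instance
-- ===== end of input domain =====

-- B replaces A's single break-loop by: cumulative-weight table, first-exceeding cutoff scan, prefix slice, two separate sums (same cost, different decomposition).


-- ===== PORT A =====
-- the for-loop with break, over (sac, valeur_totale, masse_totale)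
def sacLoopA (masse_max : Int) : List (Int × Int) → Int → Int → List (Int × Int) → (List (Int × Int)) × Int × Int
  | [], masse_totale, valeur_totale, sac => (sac, valeur_totale, masse_totale)
  | objet :: rest, masse_totale, valeur_totale, sac =>
    if masse_totale + objet.2 ≤ masse_max then
      sacLoopA masse_max rest (masse_totale + objet.2) (valeur_totale + objet.1) (sac ++ [objet])
    else (sac, valeur_totale, masse_totale)

def sac_a_dos2 (masse_max : Int) (liste_objets : List (Int × Int)) : (List (Int × Int)) × Int × Int :=
  sacLoopA masse_max (PySem.List.sorted liste_objets (fun x => x.2) false) 0 0 []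

-- ===== PORT B =====
-- cumulative-weight list (running total as accumulator)
def cumB : List (Int × Int) → Int → List Int
  | [], _ => []
  | o :: rest, total => (total + o.2) :: cumB rest (total + o.2)

-- first index whose cumulative mass exceeds masse_max, else the length (linear scan with break)
def cutoffB (masse_max : Int) : List Int → Nat
  | [] => 0
  | c :: rest => if c > masse_max then 0 else cutoffB masse_max rest + 1

def sac_a_dos2_alt (masse_max : Int) (liste_objets : List (Int × Int)) : (List (Int × Int)) × Int × Int :=
  let sorted_objets := PySem.List.sorted liste_objets (fun x => x.2) false
  let cum := cumB sorted_objets 0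
  let cutoff := cutoffB masse_max cum
  let sac := sorted_objets.take cutoff
  let valeur_totale := (sac.map (fun v => v.1)).sum
  let masse_totale := (sac.map (fun v => v.2)).sum
  (sac, valeur_totale, masse_totale)

-- ===== PRECONDITION & SPEC =====
def Spec_sac_a_dos2 (masse_max : Int) (liste_objets : List (Int × Int)) (out : (List (Int × Int)) × Int × Int) : Prop := out = sac_a_dos2_alt masse_max liste_objets
instance (masse_max : Int) (liste_objets : List (Int × Int)) (out : (List (Int × Int)) × Int × Int) : Decidable (Spec_sac_a_dos2 masse_max liste_objets out) := by unfold Spec_sac_a_dos2; infer_instance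

-- ===== CLAIM (what is proved, stated in full; the proofs are below) =====
def Claim_equal_sac_a_dos2 : Prop := ∀ (masse_max : Int) (liste_objets : List (Int × Int)), Dom_sac_a_dos2 masse_max liste_objets → Spec_sac_a_dos2 masse_max liste_objets (sac_a_dos2 masse_max liste_objets)

-- ===== LEMMAS AND PROOFS =====
lemma sacLoopA_eq (masse_max : Int) (l : List (Int × Int)) :
    ∀ (mt vt : Int) (sac : List (Int × Int)),
      sacLoopA masse_max l mt vt sac =
        (sac ++ l.take (cutoffB masse_max (cumB l mt)),
         vt + ((l.take (cutoffB masse_max (cumB l mt))).map (fun v => v.1)).sum,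
         mt + ((l.take (cutoffB masse_max (cumB l mt))).map (fun v => v.2)).sum) := by
  induction l with
  | nil => intro mt vt sac; simp [sacLoopA, cumB, cutoffB]
  | cons o rest ih =>
    intro mt vt sac
    simp only [sacLoopA, cumB, cutoffB]
    by_cases h : mt + o.2 ≤ masse_max
    · rw [if_pos h, if_neg (by omega), ih]
      simp [List.take_succ_cons]
      constructor
      · ring
      · ring
    · rw [if_neg h, if_pos (by omega)]
      simp

-- ===== VERDICT (by name: the statement is the Claim_ definition above) =====
theorem sac_a_dos2_spec : Claim_equal_sac_a_dos2 := by
  intro masse_max liste_objets _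
  unfold Spec_sac_a_dos2 sac_a_dos2 sac_a_dos2_alt
  rw [sacLoopA_eq]
  simp
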